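-- pv_equiv track=rewrite | github.com/KingFuRong/pythonSpider | 逆向百例/京东h5st_5_0_4.py | get_key_salt
-- ===== SOURCE A (Python) =====
-- def get_key_salt(key):
--     salt_map = 'dcbaZYXWVUTSRQPONMLKJIHGFEDCBA-_9876543210zyxwvutsrqponmlkjihgfe'
--     tk_len = len(key)
--     tk_slice = int(tk_len / 6)
--     tk_salt = str()
--     salt_index = 0
--
--     for index in range(0, 6):
--         if index == 5:
--             for slice_index in range(0, tk_slice + tk_len % 6):
--                 if index * tk_slice + slice_index < tk_len:
--                     salt_index += ord(key[index * tk_slice + slice_index])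
--         else:
--             for slice_index in range(0, tk_slice):
--                 if index * tk_slice + slice_index < tk_len:
--                     salt_index += ord(key[index * tk_slice + slice_index])
--         salt_index *= 25
--         salt_index %= 64
--         tk_salt += salt_map[salt_index]
--         salt_index = 0
--
--     return tk_salt
-- ===== SOURCE B (Python) =====
-- def get_key_salt(key):
--     salt_map = 'dcbaZYXWVUTSRQPONMLKJIHGFEDCBA-_9876543210zyxwvutsrqponmlkjihgfe'
--     ts = len(key) // 6
--     sums = [0] * 6
--     for p in range(len(key)):
--         b = min(p // ts, 5) if ts else 5
--         sums[b] += ord(key[p])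
--     return ''.join(salt_map[(s * 25) % 64] for s in sums)
-- ===== Notes on version B (the rewrite author's own statement) =====
-- stated objective: simpler
-- what changed: A runs six separate inner loops, one per output character, each re-scanning its slice of the key with an index-bound guard; B makes a single scatter pass over the key that routes each character position into one of six bucket accumulators and then maps the six sums through the salt alphabet.
import Mathlib
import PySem

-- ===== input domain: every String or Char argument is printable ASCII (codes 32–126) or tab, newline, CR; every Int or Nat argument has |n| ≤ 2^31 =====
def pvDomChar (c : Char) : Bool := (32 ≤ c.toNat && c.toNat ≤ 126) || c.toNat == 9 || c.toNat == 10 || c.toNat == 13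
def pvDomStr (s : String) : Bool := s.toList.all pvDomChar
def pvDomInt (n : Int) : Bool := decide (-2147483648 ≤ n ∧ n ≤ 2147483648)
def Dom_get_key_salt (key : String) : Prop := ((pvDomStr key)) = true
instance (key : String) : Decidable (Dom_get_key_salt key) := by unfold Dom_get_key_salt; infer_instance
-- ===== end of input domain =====

-- B replaces A's six nested slice loops by ONE scatter pass over the key that maintains six
-- bucket accumulators, then maps the six sums through the salt alphabet (objective: simpler).

def pvSaltMap : List Char := "dcbaZYXWVUTSRQPONMLKJIHGFEDCBA-_9876543210zyxwvutsrqponmlkjihgfe".toList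

-- ===== PORT A =====
-- inner loop 'for slice_index in range(0, cnt): if index*tk_slice+slice_index < tk_len: salt_index += ord(key[...])'
-- (key[pos] via getD: the guard 'pos < tk_len' makes the index in range, so Python never raises here)
def pvAInner (cs : List Char) (ts n i cnt : Nat) : Nat :=
  (List.range cnt).foldl
    (fun acc j => if i * ts + j < n then acc + (cs.getD (i * ts + j) ' ').toNat else acc) 0

-- 'int(tk_len / 6)' is ported as Nat division: exact for every nonnegative length below 2^52
def get_key_salt (key : String) : String :=
  let cs := key.toList
  let tk_len := cs.length
  let tk_slice := tk_len / 6
  String.mk ((List.range 6).foldl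
    (fun acc index =>
      let salt_index :=
        if index == 5 then pvAInner cs tk_slice tk_len index (tk_slice + tk_len % 6)
        else pvAInner cs tk_slice tk_len index tk_slice
      acc ++ [pvSaltMap.getD ((salt_index * 25) % 64) 'd']) [])

-- ===== PORT B =====
def get_key_salt_alt (key : String) : String :=
  let cs := key.toList
  let ts := cs.length / 6
  let sums := (List.range cs.length).foldl
    (fun (ss : List Nat) p =>
      let b := if ts = 0 then 5 else min (p / ts) 5
      ss.modify b (· + (cs.getD p ' ').toNat)) [0, 0, 0, 0, 0, 0]
  String.mk (sums.map (fun s => pvSaltMap.getD ((s * 25) % 64) 'd'))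

-- ===== PRECONDITION & SPEC =====
def Spec_get_key_salt (key : String) (out : String) : Prop := out = get_key_salt_alt key
instance (key : String) (out : String) : Decidable (Spec_get_key_salt key out) := by unfold Spec_get_key_salt; infer_instance

-- ===== CLAIM (what is proved, stated in full; the proofs are below) =====
def Claim_equal_get_key_salt : Prop := ∀ (key : String), Dom_get_key_salt key → Spec_get_key_salt key (get_key_salt key)

-- ===== LEMMAS AND PROOFS =====

-- B's routing function, and the per-bucket contribution as a common normal form
def pvRoute (ts p : Nat) : Nat := if ts = 0 then 5 else min (p / ts) 5

def pvOrd (cs : List Char) (p : Nat) : Nat := (cs.getD p ' ').toNat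

def pvBucket (cs : List Char) (ts i : Nat) : Nat :=
  ∑ p ∈ Finset.range cs.length, if pvRoute ts p = i then pvOrd cs p else 0

def pvCnt (n ts i : Nat) : Nat := if i = 5 then ts + n % 6 else ts

theorem pvListSum_range (n : Nat) (g : Nat → Nat) :
    ((List.range n).map g).sum = ∑ j ∈ Finset.range n, g j := by
  induction n with
  | zero => simp
  | succ m ih => rw [List.range_succ, Finset.sum_range_succ, List.map_append, List.sum_append, ih]; simp

theorem pvAInner_no_guard (cs : List Char) (ts n i cnt : Nat) (hn : n = cs.length)
    (h : i * ts + cnt ≤ n) :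
    pvAInner cs ts n i cnt = ∑ j ∈ Finset.range cnt, pvOrd cs (i * ts + j) := by
  subst hn
  rw [← pvListSum_range]
  unfold pvAInner
  induction cnt with
  | zero => simp
  | succ m ih =>
    have hlt : i * ts + m < cs.length := by omega
    rw [List.range_succ, List.foldl_append, List.map_append, List.sum_append, ih (by omega)]
    simp [pvOrd, hlt]

theorem pvDivEq (p ts i : Nat) (h : 0 < ts) : p / ts = i ↔ i * ts ≤ p ∧ p < (i + 1) * ts := by
  constructor
  · rintro rfl
    refine ⟨Nat.div_mul_le_self p ts, ?_⟩
    rw [Nat.add_mul, Nat.one_mul]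
    exact Nat.lt_div_mul_add h
  · rintro ⟨h1, h2⟩
    exact Nat.div_eq_of_lt_le h1 h2

theorem pvRoute_eq_iff (n ts p i : Nat) (hts : ts = n / 6) (hi : i < 6) (hp : p < n) :
    pvRoute ts p = i ↔ (i * ts ≤ p ∧ p < i * ts + pvCnt n ts i) := by
  have hdm := Nat.div_add_mod n 6
  unfold pvRoute pvCnt
  rcases eq_or_ne ts 0 with h0 | h0
  · have hn6 : n < 6 := by omega
    subst hts
    rw [if_pos h0]
    simp only [h0, Nat.mul_zero, Nat.zero_add]
    constructor
    · intro h5i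
      rw [← h5i]
      simp only [reduceIte]
      omega
    · rintro ⟨-, h2⟩
      by_cases hi5 : i = 5
      · omega
      · rw [if_neg hi5] at h2
        omega
  · have hpos : 0 < ts := Nat.pos_of_ne_zero h0
    rw [if_neg h0]
    by_cases hi5 : i = 5
    · subst hi5
      have h5 := Nat.le_div_iff_mul_le (k := ts) hpos (x := 5) (y := p)
      simp only [reduceIte]
      constructor
      · intro hmin
        have hle : 5 * ts ≤ p := h5.mp (by omega)
        omega
      · rintro ⟨h1, h2⟩
        have : 5 ≤ p / ts := h5.mpr h1
        omega
    · have hd := pvDivEq p ts i hpos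
      have hmul : (i + 1) * ts = i * ts + ts := by ring
      simp only [hi5, reduceIte]
      constructor
      · intro hmin
        have hq : p / ts = i := by omega
        have := hd.mp hq
        omega
      · rintro ⟨h1, h2⟩
        have hq : p / ts = i := hd.mpr (by omega)
        omega

theorem pvBucket_eq_inner (cs : List Char) (ts i : Nat) (hts : ts = cs.length / 6) (hi : i < 6) :
    pvBucket cs ts i = pvAInner cs ts cs.length i (pvCnt cs.length ts i) := by
  have hdm := Nat.div_add_mod cs.length 6
  have hcnt : i * ts + pvCnt cs.length ts i ≤ cs.length := by
    unfold pvCnt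
    by_cases h5 : i = 5
    · subst h5; rw [if_pos rfl]; omega
    · rw [if_neg h5]
      have := Nat.mul_le_mul_right ts (show i ≤ 4 by omega)
      omega
  rw [pvAInner_no_guard cs ts cs.length i _ rfl hcnt]
  unfold pvBucket
  rw [← Finset.sum_filter]
  have hfil : (Finset.range cs.length).filter (fun p => pvRoute ts p = i)
      = Finset.Ico (i * ts) (i * ts + pvCnt cs.length ts i) := by
    ext p
    simp only [Finset.mem_filter, Finset.mem_range, Finset.mem_Ico]
    constructor
    · rintro ⟨hp, hr⟩; exact (pvRoute_eq_iff cs.length ts p i hts hi hp).mp hr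
    · rintro ⟨h1, h2⟩
      have hp : p < cs.length := by omega
      exact ⟨hp, (pvRoute_eq_iff cs.length ts p i hts hi hp).mpr ⟨h1, h2⟩⟩
  rw [hfil, Finset.sum_Ico_eq_sum_range]
  simp

theorem pvScatter_getD (route : Nat → Nat) (g : Nat → Nat) (l : List Nat) :
    ∀ (ss : List Nat) (i : Nat), i < ss.length →
    ((l.foldl (fun ss p => ss.modify (route p) (· + g p)) ss).getD i 0)
      = ss.getD i 0 + ((l.map (fun p => if route p = i then g p else 0)).sum) := by
  induction l with
  | nil => intro ss i h; simp
  | cons p tl ih =>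
    intro ss i h
    simp only [List.foldl_cons, List.map_cons, List.sum_cons]
    rw [ih _ i (by simpa using h)]
    rcases Nat.lt_or_ge (route p) ss.length with hr | hr
    · rw [List.getD_eq_getElem?_getD, List.getElem?_modify]
      by_cases he : route p = i <;> simp [he, h] <;> omega
    · rw [List.modify_eq_self hr]
      have : route p ≠ i := by omega
      simp [this]

theorem pvScatter_length (route : Nat → Nat) (g : Nat → Nat) (l : List Nat) (ss : List Nat) :
    (l.foldl (fun ss p => ss.modify (route p) (· + g p)) ss).length = ss.length := by
  induction l generalizing ss with
  | nil => rfl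
  | cons p tl ih => simp [List.foldl_cons, ih]

theorem pvList6 (l : List Nat) (h : l.length = 6) :
    l = [l.getD 0 0, l.getD 1 0, l.getD 2 0, l.getD 3 0, l.getD 4 0, l.getD 5 0] := by
  match l, h with | [a,b,c,d,e,f], _ => rfl

theorem pvSums_eq (cs : List Char) (ts : Nat) :
    (List.range cs.length).foldl
      (fun (ss : List Nat) p => ss.modify (pvRoute ts p) (· + pvOrd cs p)) [0, 0, 0, 0, 0, 0]
    = [pvBucket cs ts 0, pvBucket cs ts 1, pvBucket cs ts 2,
       pvBucket cs ts 3, pvBucket cs ts 4, pvBucket cs ts 5] := by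
  have hlen := pvScatter_length (pvRoute ts) (pvOrd cs) (List.range cs.length) [0, 0, 0, 0, 0, 0]
  rw [pvList6 _ hlen]
  have hg : ∀ i, i < 6 →
      ((List.range cs.length).foldl
        (fun (ss : List Nat) p => ss.modify (pvRoute ts p) (· + pvOrd cs p)) [0,0,0,0,0,0]).getD i 0
      = pvBucket cs ts i := by
    intro i hi
    rw [pvScatter_getD (pvRoute ts) (pvOrd cs) (List.range cs.length) [0,0,0,0,0,0] i (by simpa),
        pvListSum_range]
    unfold pvBucket
    match i, hi with
    | 0, _ => simp | 1, _ => simp | 2, _ => simp | 3, _ => simp | 4, _ => simp | 5, _ => simp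
  rw [hg 0 (by omega), hg 1 (by omega), hg 2 (by omega), hg 3 (by omega), hg 4 (by omega),
      hg 5 (by omega)]

theorem pvA_unfold (key : String) :
    get_key_salt key = String.mk
      ([0,1,2,3,4,5].map (fun i => pvSaltMap.getD
        ((pvAInner key.toList (key.toList.length / 6) key.toList.length i
            (pvCnt key.toList.length (key.toList.length / 6) i) * 25) % 64) 'd')) := by
  rfl

theorem pvB_unfold (key : String) :
    get_key_salt_alt key = String.mk
      (((List.range key.toList.length).foldl
        (fun (ss : List Nat) p => ss.modify (pvRoute (key.toList.length / 6) p)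
          (· + pvOrd key.toList p)) [0,0,0,0,0,0]).map
        (fun s => pvSaltMap.getD ((s * 25) % 64) 'd')) := by
  rfl

-- ===== VERDICT (by name: the statement is the Claim_ definition above) =====
theorem get_key_salt_spec : Claim_equal_get_key_salt := by
  intro key _
  unfold Spec_get_key_salt
  rw [pvA_unfold, pvB_unfold, pvSums_eq]
  have hb : ∀ i, i < 6 →
      pvAInner key.toList (key.toList.length / 6) key.toList.length i
        (pvCnt key.toList.length (key.toList.length / 6) i)
      = pvBucket key.toList (key.toList.length / 6) i :=
    fun i hi => (pvBucket_eq_inner key.toList (key.toList.length / 6) i rfl hi).symm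
  simp only [List.map]
  rw [hb 0 (by omega), hb 1 (by omega), hb 2 (by omega), hb 3 (by omega), hb 4 (by omega),
      hb 5 (by omega)]
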